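-- pv_equiv track=rewrite | github.com/LuanoRodrigues/3Cs-attribution-Framework | Research/synthesis.py | _assign_stream_a_dqids
-- ===== SOURCE A (Python) =====
-- from typing import Any, Dict, List, Tuple
--
-- def _assign_stream_a_dqids(rows: List[Dict[str, Any]]) -> List[Dict[str, Any]]:
--     grouped: Dict[str, List[Dict[str, Any]]] = {}
--     for r in rows:
--         k = r["item_key"]
--         if k not in grouped:
--             grouped[k] = []
--         grouped[k].append(r)
--
--     out: List[Dict[str, Any]] = []
--     for item_key, items in grouped.items():
--         items_sorted = sorted(items, key=lambda x: x["quote_normalized"])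
--         i = 1
--         for r in items_sorted:
--             dqid = f"{item_key}#DQ{str(i).zfill(3)}"
--             rr = dict(r)
--             rr["dqid"] = dqid
--             out.append(rr)
--             i += 1
--     return out
-- ===== SOURCE B (Python) =====
-- from typing import Any, Dict, List
--
-- def _assign_stream_a_dqids(rows: List[Dict[str, Any]]) -> List[Dict[str, Any]]:
--     # First-appearance index of each item_key, in one pass.
--     first: Dict[str, int] = {}
--     for i, r in enumerate(rows):
--         first.setdefault(r["item_key"], i)
--     # One global stable sort: primary = first-appearance of the key, secondary = quote.
--     ordered = sorted(rows, key=lambda r: (first[r["item_key"]], r["quote_normalized"]))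
--     # Single counter-driven pass assigning per-key sequential ids.
--     counters: Dict[str, int] = {}
--     out: List[Dict[str, Any]] = []
--     for r in ordered:
--         k = r["item_key"]
--         n = counters.get(k, 0) + 1
--         counters[k] = n
--         rr = dict(r)
--         rr["dqid"] = f"{k}#DQ{str(n).zfill(3)}"
--         out.append(rr)
--     return out
-- ===== Notes on version B (the rewrite author's own statement) =====
-- stated objective: alternative
-- what changed: A groups rows into a dict of per-key lists and then sorts and numbers each group separately; B builds a first-appearance-index dict, performs one global stable sort keyed by (first-appearance index of item_key, quote_normalized), and assigns dqids in a single counter-driven pass.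
import Mathlib
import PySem

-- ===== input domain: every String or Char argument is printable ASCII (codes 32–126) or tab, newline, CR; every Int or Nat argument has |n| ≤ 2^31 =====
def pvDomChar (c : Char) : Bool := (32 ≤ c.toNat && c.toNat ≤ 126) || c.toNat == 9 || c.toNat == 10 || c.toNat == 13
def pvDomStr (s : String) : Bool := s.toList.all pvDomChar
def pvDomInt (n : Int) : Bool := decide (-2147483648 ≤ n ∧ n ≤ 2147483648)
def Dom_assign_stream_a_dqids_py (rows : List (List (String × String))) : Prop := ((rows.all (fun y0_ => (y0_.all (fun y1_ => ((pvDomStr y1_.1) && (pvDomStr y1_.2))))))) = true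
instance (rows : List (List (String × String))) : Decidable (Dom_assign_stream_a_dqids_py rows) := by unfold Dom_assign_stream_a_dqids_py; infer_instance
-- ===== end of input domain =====

-- B replaces A's group-then-sort-each-group nesting with one global stable sort (primary key =
-- first-appearance index of the item_key, secondary key = the quote) followed by a single
-- counter-driven output pass; same return value, different decomposition (objective: alternative).

-- ===== PORT A =====
-- literal transliteration of A: build the grouped dict in one pass, then per group sort + number.
-- r["item_key"] / x["quote_normalized"] are ported as Dict.getD with default "" — total forms that
-- agree with Python exactly on inputs satisfying Pre_ (both keys present in every row).
def assign_stream_a_dqids_py (rows : List (List (String × String))) : List (List (String × String)) :=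
  let grouped : PySem.Dict String (List (List (String × String))) :=
    rows.foldl (fun grouped r =>
      let k := PySem.Dict.getD (PySem.Dict.mk r) "item_key" ""
      let grouped := if grouped.contains k then grouped else grouped.insert k []
      grouped.modify k [] (fun items => items ++ [r])) PySem.Dict.empty
  grouped.items.foldl (fun out p =>
    let items_sorted := PySem.List.sorted p.2 (fun x => PySem.Dict.getD (PySem.Dict.mk x) "quote_normalized" "") false
    (items_sorted.foldl (fun (st : List (List (String × String)) × Int) r =>
      let dqid := p.1 ++ "#DQ" ++ PySem.Str.zfill (PySem.Int.toStr st.2) 3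
      let rr := (PySem.Dict.insert (PySem.Dict.mk r) "dqid" dqid).items
      (st.1 ++ [rr], st.2 + 1)) (out, 1)).1) []

-- ===== PORT B =====
-- literal transliteration of B: first-appearance-index dict, one global sorted2, counter pass.
def assign_stream_a_dqids_py_alt (rows : List (List (String × String))) : List (List (String × String)) :=
  let first : PySem.Dict String Int :=
    (PySem.List.enumerate rows 0).foldl (fun first p =>
      first.setdefault (PySem.Dict.getD (PySem.Dict.mk p.2) "item_key" "") p.1) PySem.Dict.empty
  let ordered := PySem.List.sorted2 rows
    (fun r => first.getD (PySem.Dict.getD (PySem.Dict.mk r) "item_key" "") 0)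
    (fun r => PySem.Dict.getD (PySem.Dict.mk r) "quote_normalized" "") false
  (ordered.foldl (fun (st : PySem.Dict String Int × List (List (String × String))) r =>
    let k := PySem.Dict.getD (PySem.Dict.mk r) "item_key" ""
    let n := st.1.getD k 0 + 1
    let counters := st.1.insert k n
    let rr := (PySem.Dict.insert (PySem.Dict.mk r) "dqid"
      (k ++ "#DQ" ++ PySem.Str.zfill (PySem.Int.toStr n) 3)).items
    (counters, st.2 ++ [rr])) (PySem.Dict.empty, [])).2

-- ===== PRECONDITION & SPEC =====
-- Pre_: every row has both the "item_key" and the "quote_normalized" key — exactly the inputs on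
-- which the Python A returns normally (on any other row dict A raises KeyError).
def Pre_assign_stream_a_dqids_py (rows : List (List (String × String))) : Prop :=
  ∀ r ∈ rows, (PySem.Dict.mk r).contains "item_key" = true ∧ (PySem.Dict.mk r).contains "quote_normalized" = true
instance (rows : List (List (String × String))) : Decidable (Pre_assign_stream_a_dqids_py rows) := by unfold Pre_assign_stream_a_dqids_py; infer_instance

def pvWitness_assign_stream_a_dqids_py : (List (List (String × String))) :=
  [[("item_key", "a"), ("quote_normalized", "q")], [("item_key", "a"), ("quote_normalized", "p")]]

def Spec_assign_stream_a_dqids_py (rows : List (List (String × String))) (out : List (List (String × String))) : Prop := out = assign_stream_a_dqids_py_alt rows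
instance (rows : List (List (String × String))) (out : List (List (String × String))) : Decidable (Spec_assign_stream_a_dqids_py rows out) := by unfold Spec_assign_stream_a_dqids_py; infer_instance

-- ===== CLAIM (what is proved, stated in full; the proofs are below) =====
def Claim_equal_assign_stream_a_dqids_py : Prop := ∀ (rows : List (List (String × String))), Dom_assign_stream_a_dqids_py rows → Pre_assign_stream_a_dqids_py rows → Spec_assign_stream_a_dqids_py rows (assign_stream_a_dqids_py rows)

-- ===== LEMMAS AND PROOFS =====
-- Both ports are reduced to the same normal form pvNF: for each distinct item_key in
-- first-appearance order, the rows with that key, stably sorted by quote, numbered from 1.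

def pvKey (r : List (String × String)) : String := PySem.Dict.getD (PySem.Dict.mk r) "item_key" ""
def pvQ (r : List (String × String)) : String := PySem.Dict.getD (PySem.Dict.mk r) "quote_normalized" ""

theorem pv_stepA_eq_modify (g : PySem.Dict String (List (List (String × String)))) (k : String)
    (r : List (String × String)) :
    (if g.contains k = true then g else g.insert k []).modify k [] (fun items => items ++ [r])
      = g.modify k [] (fun items => items ++ [r]) := by
  by_cases h : g.contains k = true
  · simp [h]
  · have h' : g.contains k = false := by simpa using h
    have hall : ∀ p ∈ g.items, ¬ (p.1 == k) = true := by
      have := h'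
      unfold PySem.Dict.contains at this
      simpa [List.any_eq_false] using this
    have hfind : g.items.find? (fun p => p.1 == k) = none := by
      rw [List.find?_eq_none]; exact hall
    have hany : (g.items.any fun p => p.1 == k) = false := by
      exact h'
    simp [PySem.Dict.modify, PySem.Dict.insert, PySem.Dict.getD, PySem.Dict.get?,
      PySem.Dict.contains, hany, List.find?_append, hfind, List.any_append,
      List.map_append]
    have hne : ∀ p ∈ g.items, p.1 ≠ k := by
      intro p hp e; exact hall p hp (by simp [e])
    calc List.map (fun p => if p.1 = k then (k, [r]) else p) g.items
        = List.map id g.items := List.map_congr_left (fun p hp => by simp [hne p hp])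
      _ = g.items := List.map_id _

def pvTag (c : String) (n : Int) (r : List (String × String)) : List (String × String) :=
  (PySem.Dict.insert (PySem.Dict.mk r) "dqid" (c ++ "#DQ" ++ PySem.Str.zfill (PySem.Int.toStr n) 3)).items

def pvNumberFrom (c : String) (n : Int) : List (List (String × String)) → List (List (String × String))
  | [] => []
  | r :: t => pvTag c n r :: pvNumberFrom c (n + 1) t

def pvGrp (rows : List (List (String × String))) (c : String) : List (List (String × String)) :=
  rows.filter (fun r => pvKey r == c)

def pvKs (rows : List (List (String × String))) : List String :=
  PySem.Set.ofList (rows.map pvKey)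

def pvNF (rows : List (List (String × String))) : List (List (String × String)) :=
  (pvKs rows).flatMap (fun c => pvNumberFrom c 1 (PySem.List.sorted (pvGrp rows c) pvQ false))

-- a dict with Nodup keys is determined by its keys and its lookups
theorem pv_items_eq {ν : Type} (l : List (String × ν)) (v0 : ν) (h : (l.map Prod.fst).Nodup) :
    l = (l.map Prod.fst).map (fun c => (c, (PySem.Dict.mk l).getD c v0)) := by
  induction l with
  | nil => rfl
  | cons p t ih =>
    obtain ⟨k, v⟩ := p
    simp only [List.map_cons, List.nodup_cons] at h ⊢
    congr 1
    · simp [PySem.Dict.getD, PySem.Dict.get?, List.find?]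
    · calc t = (t.map Prod.fst).map (fun c => (c, (PySem.Dict.mk t).getD c v0)) := ih h.2
        _ = (t.map Prod.fst).map (fun c => (c, (PySem.Dict.mk ((k, v) :: t)).getD c v0)) := by
            apply List.map_congr_left
            intro c hc
            have hck : ¬ (k == c) = true := by
              simp only [beq_iff_eq]
              intro e; exact h.1 (e ▸ hc)
            simp [PySem.Dict.getD, PySem.Dict.get?, hck]

theorem pv_innerA (c : String) (items : List (List (String × String)))
    : ∀ (out : List (List (String × String))) (n : Int),
    (items.foldl (fun (st : List (List (String × String)) × Int) r =>
        (st.1 ++ [pvTag c st.2 r], st.2 + 1)) (out, n)).1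
      = out ++ pvNumberFrom c n items := by
  induction items with
  | nil => intro out n; simp [pvNumberFrom]
  | cons r t ih => intro out n; simp [pvNumberFrom, ih, List.append_assoc]

def pvGroupedM (rows : List (List (String × String))) : PySem.Dict String (List (List (String × String))) :=
  rows.foldl (fun g r => g.modify (pvKey r) [] (fun items => items ++ [r])) PySem.Dict.empty

theorem pv_groupedM_getD (rows : List (List (String × String))) (c : String) :
    (pvGroupedM rows).getD c [] = pvGrp rows c := by
  have h1 := PySem.Dict.getD_foldl_modify_append (l := rows.map (fun r => (pvKey r, r)))
    (d := PySem.Dict.empty) (c := c)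
  rw [List.foldl_map] at h1
  simp only [pvGroupedM]
  rw [h1]
  simp only [List.filter_map, Function.comp_def, pvGrp]
  simp [PySem.Dict.getD, PySem.Dict.get?, PySem.Dict.empty]
  exact (List.map_congr_left (fun r _ => rfl)).trans (List.map_id _)

theorem pv_groupedM_keys (rows : List (List (String × String))) :
    (pvGroupedM rows).keys = pvKs rows := by
  have h1 := PySem.Dict.keys_foldl_modify_key (l := rows) (key := pvKey) (d0 := [])
    (f := fun _ r => (fun items => items ++ [r])) (d := PySem.Dict.empty)
  simp only [pvGroupedM]
  rw [h1]
  simp [PySem.Set.update_eq_foldl, PySem.Set.ofList_eq_foldl, PySem.Dict.empty, PySem.Dict.keys,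
    pvKs]

theorem pv_groupedM_nodup (rows : List (List (String × String))) :
    (pvGroupedM rows).keys.Nodup := by
  apply PySem.Dict.nodup_keys_foldl_modify_key
  simp [PySem.Dict.empty, PySem.Dict.keys]

theorem pv_groupedM_items (rows : List (List (String × String))) :
    (pvGroupedM rows).items = (pvKs rows).map (fun c => (c, pvGrp rows c)) := by
  have h := pv_items_eq (pvGroupedM rows).items []
    (by simpa [PySem.Dict.keys] using pv_groupedM_nodup rows)
  calc (pvGroupedM rows).items
      = ((pvGroupedM rows).items.map Prod.fst).map
          (fun c => (c, (PySem.Dict.mk (pvGroupedM rows).items).getD c [])) := h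
    _ = (pvKs rows).map (fun c => (c, pvGrp rows c)) := by
        have hk : (pvGroupedM rows).items.map Prod.fst = pvKs rows := pv_groupedM_keys rows
        rw [hk]
        apply List.map_congr_left
        intro c _
        rw [show PySem.Dict.mk (pvGroupedM rows).items = pvGroupedM rows from rfl,
          pv_groupedM_getD]

theorem pvA_eq_NF (rows : List (List (String × String))) :
    assign_stream_a_dqids_py rows = pvNF rows := by
  show ((rows.foldl (fun g r =>
      (if g.contains (pvKey r) = true then g else g.insert (pvKey r) []).modify (pvKey r) []
        (fun items => items ++ [r])) PySem.Dict.empty).items.foldl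
      (fun out p => ((PySem.List.sorted p.2 pvQ false).foldl
        (fun (st : List (List (String × String)) × Int) r =>
          (st.1 ++ [pvTag p.1 st.2 r], st.2 + 1)) (out, 1)).1) []) = pvNF rows
  have hfold : (rows.foldl (fun g r =>
      (if g.contains (pvKey r) = true then g else g.insert (pvKey r) []).modify (pvKey r) []
        (fun items => items ++ [r])) PySem.Dict.empty) = pvGroupedM rows := by
    unfold pvGroupedM
    congr 1
    funext g r
    exact pv_stepA_eq_modify g (pvKey r) r
  rw [hfold, pv_groupedM_items, List.foldl_map]
  have hstep : (fun (x : List (List (String × String))) (y : String) =>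
      (fun out p => ((PySem.List.sorted (Prod.snd p) pvQ false).foldl
        (fun (st : List (List (String × String)) × Int) r =>
          (st.1 ++ [pvTag (Prod.fst p) st.2 r], st.2 + 1)) (out, 1)).1) x ((fun c => (c, pvGrp rows c)) y))
      = fun out c => out ++ pvNumberFrom c 1 (PySem.List.sorted (pvGrp rows c) pvQ false) := by
    funext out c
    exact pv_innerA c _ out 1
  rw [hstep, PySem.List.foldl_append_eq_flatMap]
  simp [pvNF]

-- ===== B side =====

theorem pv_insertBy_skip {α : Type} (bf : α → α → Bool) (x : α) (L M : List α)
    (h : ∀ y ∈ L, bf x y = false) :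
    PySem.List.insertBy bf x (L ++ M) = L ++ PySem.List.insertBy bf x M := by
  induction L with
  | nil => simp
  | cons y t ih =>
    rw [List.cons_append, PySem.List.insertBy, if_neg (by simp [h y (by simp)])]
    rw [ih (fun z hz => h z (by simp [hz])), List.cons_append]

theorem pv_insertBy_stop {α : Type} (bf : α → α → Bool) (x : α) (M L2 : List α)
    (h : ∀ y ∈ L2, bf x y = true) :
    PySem.List.insertBy bf x (M ++ L2) = PySem.List.insertBy bf x M ++ L2 := by
  induction M with
  | nil =>
    cases L2 with
    | nil => simp
    | cons y t => simp [PySem.List.insertBy, h y (by simp)]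
  | cons z M ih =>
    by_cases hz : bf x z = true
    · simp [PySem.List.insertBy, hz]
    · rw [List.cons_append, PySem.List.insertBy, if_neg hz, PySem.List.insertBy, if_neg hz]
      rw [ih, List.cons_append]

theorem pv_insertBy_congr {α : Type} (bf1 bf2 : α → α → Bool) (x : α) (M : List α)
    (h : ∀ y ∈ M, bf1 x y = bf2 x y) :
    PySem.List.insertBy bf1 x M = PySem.List.insertBy bf2 x M := by
  induction M with
  | nil => rfl
  | cons y t ih =>
    rw [PySem.List.insertBy, PySem.List.insertBy, h y (by simp)]
    by_cases hy : bf2 x y = true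
    · simp [hy]
    · simp only [hy, Bool.false_eq_true, if_false]
      rw [ih (fun z hz => h z (by simp [hz]))]

theorem pv_sorted_append {α : Type} (xs : List α) (x : α) (key : α → String) :
    PySem.List.sorted (xs ++ [x]) key false
      = PySem.List.insertBy (fun a b => decide (key a < key b)) x (PySem.List.sorted xs key false) := by
  rw [PySem.List.sorted_eq_foldl_insertBy, PySem.List.sorted_eq_foldl_insertBy, List.foldl_append]
  rfl

theorem pv_sorted2_append {α : Type} (xs : List α) (x : α) (k1 : α → Int) (k2 : α → String) :
    PySem.List.sorted2 (xs ++ [x]) k1 k2 false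
      = PySem.List.insertBy
          (fun a b => decide (k1 a < k1 b) || (!decide (k1 b < k1 a) && decide (k2 a < k2 b)))
          x (PySem.List.sorted2 xs k1 k2 false) := by
  simp [PySem.List.sorted2, List.foldl_append]

theorem pv_split {α : Type} (k : α → String) (g : α → String) (cs : List String) (pv : String → Int)
    (hnd : cs.Nodup) (hpw : (cs.map pv).Pairwise (· < ·)) :
    ∀ xs : List α, (∀ x ∈ xs, k x ∈ cs) →
    PySem.List.sorted2 xs (fun x => pv (k x)) g false
      = cs.flatMap (fun c => PySem.List.sorted (xs.filter (fun x => k x == c)) g false) := by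
  intro xs
  induction xs using List.reverseRecOn with
  | nil =>
    intro _
    simp [PySem.List.sorted2, PySem.List.sorted_eq_foldl_insertBy]
  | append_singleton xs x ih =>
    intro hmem
    have hc0 : k x ∈ cs := hmem x (by simp)
    obtain ⟨cs1, cs2, hcs⟩ := List.append_of_mem hc0
    subst hcs
    have hnd1 : k x ∉ cs1 := by
      intro hmem1
      rcases List.nodup_append.1 hnd with ⟨_, _, hdis⟩
      exact hdis (k x) hmem1 (k x) List.mem_cons_self rfl
    have hnd2 : k x ∉ cs2 := by
      rcases List.nodup_append.1 hnd with ⟨_, hcons, _⟩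
      exact (List.nodup_cons.1 hcons).1
    have hlt1 : ∀ c ∈ cs1, pv c < pv (k x) := by
      intro c hc
      rcases List.pairwise_append.1 (by simpa using hpw) with ⟨_, _, hx⟩
      exact hx _ (List.mem_map_of_mem hc) _ (by simp)
    have hlt2 : ∀ c ∈ cs2, pv (k x) < pv c := by
      intro c hc
      rcases List.pairwise_append.1 (by simpa using hpw) with ⟨_, hcons, _⟩
      exact (List.pairwise_cons.1 hcons).1 _ (List.mem_map_of_mem hc)
    have ihs := ih (fun y hy => hmem y (by simp [hy]))
    rw [pv_sorted2_append, ihs]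
    -- filters over xs ++ [x]
    have hfilter_ne : ∀ c ∈ cs1 ++ cs2, (xs ++ [x]).filter (fun y => k y == c) = xs.filter (fun y => k y == c) := by
      intro c hc
      have : ¬ (k x == c) = true := by
        simp only [beq_iff_eq]
        intro e
        rcases List.mem_append.1 hc with h1 | h2
        · exact hnd1 (e ▸ h1)
        · exact hnd2 (e ▸ h2)
      simp [List.filter_append, List.filter, this]
    have hfc0 : (xs ++ [x]).filter (fun y => k y == k x) = xs.filter (fun y => k y == k x) ++ [x] := by
      simp [List.filter_append, List.filter]
    have hR1 : cs1.flatMap (fun c => PySem.List.sorted ((xs ++ [x]).filter (fun y => k y == c)) g false)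
        = cs1.flatMap (fun c => PySem.List.sorted (xs.filter (fun y => k y == c)) g false) :=
      List.flatMap_congr (fun c hc => by rw [hfilter_ne c (by simp [hc])])
    have hR2 : cs2.flatMap (fun c => PySem.List.sorted ((xs ++ [x]).filter (fun y => k y == c)) g false)
        = cs2.flatMap (fun c => PySem.List.sorted (xs.filter (fun y => k y == c)) g false) :=
      List.flatMap_congr (fun c hc => by rw [hfilter_ne c (by simp [hc])])
    have hRm : PySem.List.sorted ((xs ++ [x]).filter (fun y => k y == k x)) g false
        = PySem.List.insertBy (fun a b => decide (g a < g b)) x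
            (PySem.List.sorted (xs.filter (fun y => k y == k x)) g false) := by
      rw [hfc0, pv_sorted_append]
    rw [List.flatMap_append, List.flatMap_cons, List.flatMap_append, List.flatMap_cons,
      hR1, hR2, hRm]
    have hskip : ∀ y ∈ cs1.flatMap (fun c => PySem.List.sorted (xs.filter (fun y => k y == c)) g false),
        (fun a b => decide (pv (k a) < pv (k b)) || (!decide (pv (k b) < pv (k a)) && decide (g a < g b))) x y = false := by
      intro y hy
      obtain ⟨c, hc, hyF⟩ := List.mem_flatMap.1 hy
      have hky : k y = c := by
        have := (List.mem_filter.1 ((PySem.List.mem_sorted _ _ _ _).1 hyF)).2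
        simpa using this
      have h1 : pv (k y) < pv (k x) := by rw [hky]; exact hlt1 c hc
      simp [h1, show ¬ pv (k x) < pv (k y) by omega]
    have hstop : ∀ y ∈ cs2.flatMap (fun c => PySem.List.sorted (xs.filter (fun y => k y == c)) g false),
        (fun a b => decide (pv (k a) < pv (k b)) || (!decide (pv (k b) < pv (k a)) && decide (g a < g b))) x y = true := by
      intro y hy
      obtain ⟨c, hc, hyF⟩ := List.mem_flatMap.1 hy
      have hky : k y = c := by
        have := (List.mem_filter.1 ((PySem.List.mem_sorted _ _ _ _).1 hyF)).2
        simpa using this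
      have h1 : pv (k x) < pv (k y) := by rw [hky]; exact hlt2 c hc
      simp [h1]
    have hcongr : ∀ y ∈ PySem.List.sorted (xs.filter (fun y => k y == k x)) g false,
        (decide (pv (k x) < pv (k y)) || (!decide (pv (k y) < pv (k x)) && decide (g x < g y)))
          = decide (g x < g y) := by
      intro y hy
      have hky : k y = k x := by
        have := (List.mem_filter.1 ((PySem.List.mem_sorted _ _ _ _).1 hy)).2
        simpa using this
      simp [hky]
    rw [pv_insertBy_skip _ x _ _ hskip, pv_insertBy_stop _ x _ _ hstop, pv_insertBy_congr _ (fun a b => decide (g a < g b)) x _ hcongr]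

theorem pv_idxOf?_append_left (c : String) (ys zs : List String) (h : c ∈ ys) :
    List.idxOf? c (ys ++ zs) = List.idxOf? c ys := by
  induction ys with
  | nil => cases h
  | cons a t ih =>
    rw [List.cons_append, List.idxOf?_cons, List.idxOf?_cons]
    by_cases ha : a = c
    · simp [ha]
    · have : c ∈ t := by
        rcases List.mem_cons.1 h with h1 | h1
        · exact absurd h1.symm ha
        · exact h1
      simp only [beq_iff_eq, ha, if_false, ih this]

theorem pv_idxOf?_some_lt (c : String) (ys : List String) (j : Nat)
    (h : List.idxOf? c ys = some j) : j < ys.length := by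
  induction ys generalizing j with
  | nil => simp [List.idxOf?] at h
  | cons a t ih =>
    rw [List.idxOf?_cons] at h
    by_cases ha : (a == c) = true
    · rw [if_pos ha] at h
      cases h
      simp
    · rw [if_neg ha] at h
      cases hid : List.idxOf? c t with
      | none => rw [hid] at h; cases h
      | some i =>
        rw [hid] at h
        cases h
        have := ih i hid
        simp; omega

theorem pv_idxOf?_append_self (y : String) (ys : List String) (h : y ∉ ys) :
    List.idxOf? y (ys ++ [y]) = some ys.length := by
  induction ys with
  | nil => simp [List.idxOf?_cons]
  | cons a t ih =>
    rw [List.cons_append, List.idxOf?_cons, if_neg (by simp; intro e; exact h (by simp [e]))]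
    rw [ih (fun hm => h (by simp [hm]))]
    simp

theorem pv_first_get? (xs : List (List (String × String))) : ∀ (s : Int) (d : PySem.Dict String Int) (c : String),
    ((PySem.List.enumerate xs s).foldl (fun d p => d.setdefault (pvKey p.2) p.1) d).get? c
      = if d.contains c = true then d.get? c
        else ((xs.map pvKey).idxOf? c).map (fun i => s + (i : Int)) := by
  induction xs with
  | nil =>
    intro s d c
    by_cases h : d.contains c = true
    · simp [PySem.List.enumerate_nil, h]
    · simp only [PySem.List.enumerate_nil, List.foldl_nil, h, List.map_nil,
        List.idxOf?, List.findIdx?_nil]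
      exact (PySem.Dict.get?_eq_none_iff_contains d c).2 (by simpa using h)
  | cons x t ih =>
    intro s d c
    rw [PySem.List.enumerate_cons, List.foldl_cons, ih]
    by_cases hc : d.contains c = true
    · have hc' : (d.setdefault (pvKey x) s).contains c = true := by
        rw [PySem.Dict.contains_setdefault]; simp [hc]
      rw [if_pos hc', if_pos hc]
      by_cases he : c = pvKey x
      · rw [PySem.Dict.setdefault_of_contains d s (he ▸ hc)]
      · exact PySem.Dict.get?_setdefault_of_ne d s he
    · by_cases he : c = pvKey x
      · have hc' : (d.setdefault (pvKey x) s).contains c = true := by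
          rw [PySem.Dict.contains_setdefault]; simp [he]
        rw [if_pos hc', if_neg hc, he, PySem.Dict.get?_setdefault_self,
          (PySem.Dict.get?_eq_none_iff_contains d (pvKey x)).2 (by simpa [he] using hc)]
        rw [List.map_cons, List.idxOf?_cons]
        simp
      · have hc' : (d.setdefault (pvKey x) s).contains c = false := by
        -- c matches neither the new key nor d
          rw [PySem.Dict.contains_setdefault]
          simp only [Bool.or_eq_false_iff]
          constructor
          · simpa using he
          · simpa using hc
        rw [if_neg (by simp [hc']), if_neg hc]
        rw [List.map_cons, List.idxOf?_cons, if_neg (by simpa using (Ne.symm he))]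
        cases hid : List.idxOf? c (t.map pvKey) with
        | none => simp
        | some j => simp; omega


def pvIdxInt (ys : List String) (c : String) : Int :=
  ((List.idxOf? c ys).map (fun i => (i : Int))).getD 0

theorem pv_pairwise_idx (ys : List String) :
    ((PySem.Set.ofList ys).map (pvIdxInt ys)).Pairwise (· < ·) := by
  induction ys using List.reverseRecOn with
  | nil => simp [PySem.Set.ofList_nil]
  | append_singleton ys y ih =>
    rw [PySem.Set.ofList_append_singleton]
    by_cases hy : y ∈ ys
    · rw [PySem.Set.add_of_mem (by rw [PySem.Set.mem_ofList]; exact hy)]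
      rw [List.map_congr_left (fun c hc => by
        unfold pvIdxInt
        rw [pv_idxOf?_append_left c ys [y] ((PySem.Set.mem_ofList ys c).1 hc)])]
      exact ih
    · rw [PySem.Set.add_of_not_mem (by rw [PySem.Set.mem_ofList]; exact hy)]
      rw [List.map_append]
      rw [List.pairwise_append]
      refine ⟨?_, by simp, ?_⟩
      · rw [List.map_congr_left (fun c hc => by
          unfold pvIdxInt
          rw [pv_idxOf?_append_left c ys [y] ((PySem.Set.mem_ofList ys c).1 hc)])]
        exact ih
      · intro a ha b hb
        simp only [List.map_cons, List.map_nil, List.mem_singleton] at hb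
        subst hb
        obtain ⟨c, hc, hceq⟩ := List.mem_map.1 ha
        have hcy : c ∈ ys := (PySem.Set.mem_ofList ys c).1 hc
        obtain ⟨j, hj⟩ : ∃ j, List.idxOf? c ys = some j := by
          cases hid : List.idxOf? c ys with
          | none => exact absurd ((List.idxOf?_eq_none_iff).1 hid) (by simp [hcy])
          | some j => exact ⟨j, rfl⟩
        have hjl : j < ys.length := pv_idxOf?_some_lt c ys j hj
        have ha' : a = (j : Int) := by
          rw [← hceq]
          unfold pvIdxInt
          rw [pv_idxOf?_append_left c ys [y] hcy, hj]
          rfl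
        have hb' : pvIdxInt (ys ++ [y]) y = (ys.length : Int) := by
          unfold pvIdxInt
          rw [pv_idxOf?_append_self y ys hy]
          rfl
        rw [ha', hb']
        exact_mod_cast hjl

def pvStepB (st : PySem.Dict String Int × List (List (String × String)))
    (r : List (String × String)) : PySem.Dict String Int × List (List (String × String)) :=
  (st.1.insert (pvKey r) (st.1.getD (pvKey r) 0 + 1),
   st.2 ++ [pvTag (pvKey r) (st.1.getD (pvKey r) 0 + 1) r])

theorem pv_stepB_dict (l : List (List (String × String))) :
    ∀ (d : PySem.Dict String Int) (acc : List (List (String × String))),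
    (l.foldl pvStepB (d, acc)).1 = l.foldl (fun d r => d.modify (pvKey r) 0 (· + 1)) d := by
  induction l with
  | nil => intro d acc; rfl
  | cons r t ih =>
    intro d acc
    rw [List.foldl_cons, List.foldl_cons, ih]
    rfl

theorem pv_passGroup (c : String) (items : List (List (String × String)))
    (hkeys : ∀ r ∈ items, pvKey r = c) :
    ∀ (d : PySem.Dict String Int) (acc : List (List (String × String))),
    (items.foldl pvStepB (d, acc)).2 = acc ++ pvNumberFrom c (d.getD c 0 + 1) items := by
  induction items with
  | nil => intro d acc; simp [pvNumberFrom]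
  | cons r t ih =>
    intro d acc
    have hr : pvKey r = c := hkeys r (by simp)
    rw [List.foldl_cons]
    rw [show pvStepB (d, acc) r
      = (d.insert c (d.getD c 0 + 1), acc ++ [pvTag c (d.getD c 0 + 1) r]) by simp [pvStepB, hr]]
    rw [ih (fun r' hr' => hkeys r' (by simp [hr']))]
    rw [PySem.Dict.getD_insert_self]
    simp [pvNumberFrom, List.append_assoc]

theorem pv_passB (cs : List String) :
    ∀ (gs : String → List (List (String × String))) (d : PySem.Dict String Int)
      (acc : List (List (String × String))),
    cs.Nodup → (∀ c ∈ cs, d.getD c 0 = 0) → (∀ c ∈ cs, ∀ r ∈ gs c, pvKey r = c) →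
    ((cs.flatMap gs).foldl pvStepB (d, acc)).2
      = acc ++ cs.flatMap (fun c => pvNumberFrom c 1 (gs c)) := by
  induction cs with
  | nil => intro gs d acc _ _ _; simp
  | cons c cs ih =>
    intro gs d acc hnd hd0 hks
    rw [List.flatMap_cons, List.foldl_append]
    have hpair : (gs c).foldl pvStepB (d, acc)
        = (((gs c).foldl pvStepB (d, acc)).1, ((gs c).foldl pvStepB (d, acc)).2) := rfl
    rw [hpair, pv_stepB_dict, pv_passGroup c (gs c) (hks c (by simp)) d acc]
    have hd0c : d.getD c 0 = 0 := hd0 c (by simp)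
    rw [hd0c]
    have hd1 : ∀ c' ∈ cs, ((gs c).foldl (fun d r => d.modify (pvKey r) 0 (· + 1)) d).getD c' 0 = 0 := by
      intro c' hc'
      have hfold : (gs c).foldl (fun d r => d.modify (pvKey r) 0 (· + 1)) d
          = ((gs c).map pvKey).foldl (fun d x => d.modify x 0 (· + 1)) d := by
        rw [List.foldl_map]
      rw [hfold, PySem.Dict.getD_foldl_modify_add_one]
      have hnotin : c' ∉ (gs c).map pvKey := by
        intro hm
        obtain ⟨r, hr, he⟩ := List.mem_map.1 hm
        rw [hks c (by simp) r hr] at he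
        exact (List.nodup_cons.1 hnd).1 (he ▸ hc')
      rw [hd0 c' (by simp [hc']), List.count_eq_zero.2 hnotin]
      simp
    rw [ih gs _ _ (List.nodup_cons.1 hnd).2 hd1 (fun c' hc' => hks c' (by simp [hc']))]
    rw [List.flatMap_cons, List.append_assoc]
    norm_num

theorem pvB_eq_NF (rows : List (List (String × String))) :
    assign_stream_a_dqids_py_alt rows = pvNF rows := by
  show ((PySem.List.sorted2 rows
      (fun r => ((PySem.List.enumerate rows 0).foldl
        (fun d p => d.setdefault (pvKey p.2) p.1) PySem.Dict.empty).getD (pvKey r) 0)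
      pvQ false).foldl pvStepB (PySem.Dict.empty, [])).2 = pvNF rows
  have hpv : ∀ c ∈ pvKs rows,
      ((PySem.List.enumerate rows 0).foldl
        (fun d p => d.setdefault (pvKey p.2) p.1) PySem.Dict.empty).getD c 0
        = pvIdxInt (rows.map pvKey) c := by
    intro c hc
    have hcy : c ∈ rows.map pvKey := (PySem.Set.mem_ofList _ _).1 hc
    show (((PySem.List.enumerate rows 0).foldl
        (fun d p => d.setdefault (pvKey p.2) p.1) PySem.Dict.empty).get? c).getD 0
        = pvIdxInt (rows.map pvKey) c
    rw [pv_first_get? rows 0 PySem.Dict.empty c]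
    rw [if_neg (by simp [PySem.Dict.contains, PySem.Dict.empty])]
    cases hid : List.idxOf? c (rows.map pvKey) with
    | none => exact absurd (List.idxOf?_eq_none_iff.1 hid) (by simp [hcy])
    | some j => simp [pvIdxInt, hid]
  have hpw : ((pvKs rows).map (fun c =>
      ((PySem.List.enumerate rows 0).foldl
        (fun d p => d.setdefault (pvKey p.2) p.1) PySem.Dict.empty).getD c 0)).Pairwise (· < ·) := by
    rw [List.map_congr_left hpv]
    exact pv_pairwise_idx (rows.map pvKey)
  have hsplit := pv_split pvKey pvQ (pvKs rows)
    (fun c => ((PySem.List.enumerate rows 0).foldl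
      (fun d p => d.setdefault (pvKey p.2) p.1) PySem.Dict.empty).getD c 0)
    (PySem.Set.nodup_ofList _) hpw rows
    (fun r hr => (PySem.Set.mem_ofList _ _).2 (List.mem_map_of_mem hr))
  rw [hsplit]
  rw [pv_passB (pvKs rows)
    (fun c => PySem.List.sorted (rows.filter (fun x => pvKey x == c)) pvQ false)
    PySem.Dict.empty [] (PySem.Set.nodup_ofList _)
    (fun c _ => by simp [PySem.Dict.getD, PySem.Dict.get?, PySem.Dict.empty])
    (fun c _ r hr => by
      have := (List.mem_filter.1 ((PySem.List.mem_sorted _ _ _ _).1 hr)).2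
      simpa using this)]
  simp [pvNF, pvGrp]

-- ===== VERDICT (by name: the statement is the Claim_ definition above) =====
theorem assign_stream_a_dqids_py_spec : Claim_equal_assign_stream_a_dqids_py := by
  intro rows _ _
  unfold Spec_assign_stream_a_dqids_py
  rw [pvA_eq_NF, pvB_eq_NF]
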